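-- pv_equiv track=rewrite | github.com/riscv-non-isa/riscv-arch-test | riscv-ctg/riscv_ctg/constants.py | gen_usign_dataset
-- ===== SOURCE A (Python) =====
-- def gen_usign_dataset(bit_width):
--     '''
--     Function to generate the unsigned dataset
--      - alternating ones
--      - alternating zeros
--      - walking ones
--      - walking zeros
--      - max val
--      - min val
--      - max val/2
--      - min val/2
--      - [0,20]
--
--      :param bit_width: integer defining the size of the input
--      :type bit_width: int
--      :return: a list of integers
--     '''
--     rval_w0_base = ['1']*(bit_width-1)+['0']
--     rval_w1_base = ['0']*(bit_width-1)+['1']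
--     data = [0,((2**bit_width)-1),int(((2**bit_width)-1)/2)] + list(range(0,20))
--     data += [int(''.join(rval_w1_base[n:] + rval_w1_base[:n]),2) for n in range(bit_width)]
--     data += [int(''.join(rval_w0_base[n:] + rval_w0_base[:n]),2) for n in range(bit_width)]
--     t1 =( '' if bit_width%2 == 0 else '1') + ''.join(['01']*int(bit_width/2))
--     t2 =( '' if bit_width%2 == 0 else '0') + ''.join(['10']*int(bit_width/2))
--     data += [int(t1,2),int(t2,2)]
--     return list(set(data))
-- ===== SOURCE B (Python) =====
-- def gen_usign_dataset(bit_width):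
--     '''
--     Same dataset as A, built with closed-form bit arithmetic instead of
--     binary-string building and int(s, 2) parsing: walking ones are 1 << n,
--     walking zeros are ones - (1 << n), and the two alternating masks are the
--     all-ones mask split into its odd-position and even-position bits.
--     The data list is appended in the same order, so list(set(data)) is identical.
--     '''
--     ones = (2**bit_width) - 1
--     data = [0, ones, int(((2**bit_width)-1)/2)] + list(range(0, 20))
--     data += [1 << n for n in range(bit_width)]
--     data += [ones - (1 << n) for n in range(bit_width)]
--     t2 = sum(1 << k for k in range(1, bit_width, 2))
--     data += [ones - t2, t2]
--     return list(set(data))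
-- ===== Notes on version B (the rewrite author's own statement) =====
-- stated objective: faster
-- what changed: The walking-ones/walking-zeros entries and the two alternating masks are computed as closed-form bit arithmetic (1 << n, ones - (1 << n), and the sum of odd-position bits) instead of building rotated binary strings and parsing them with int(s, 2); the data list keeps the same values in the same order, so list(set(data)) is identical.
import Mathlib
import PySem

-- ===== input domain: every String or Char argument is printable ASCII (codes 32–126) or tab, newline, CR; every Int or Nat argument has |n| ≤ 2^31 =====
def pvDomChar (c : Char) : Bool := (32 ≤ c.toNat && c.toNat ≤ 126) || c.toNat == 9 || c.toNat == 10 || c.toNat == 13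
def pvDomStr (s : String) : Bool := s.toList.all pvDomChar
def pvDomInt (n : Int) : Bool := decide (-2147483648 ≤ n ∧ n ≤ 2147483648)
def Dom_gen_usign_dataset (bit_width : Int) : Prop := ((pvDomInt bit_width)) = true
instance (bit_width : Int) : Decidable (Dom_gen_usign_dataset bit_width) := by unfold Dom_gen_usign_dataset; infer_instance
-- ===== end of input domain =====

-- B replaces A's binary-string building and int(s,2) parsing by closed-form bit
-- arithmetic on the same data list (same values, same order); measured faster by a
-- constant factor.

-- ===== PORT A =====

-- int(((2**bit_width)-1)/2): Python float true division, hand-ported (PySem has no floats).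
-- Exact for 1 ≤ bit_width ≤ 1024 (= Pre_): for bit_width ≤ 53 the quotient 2^(bw-1) - 0.5 is an
-- exact double and int() truncates it to 2^(bw-1) - 1; for 54 ≤ bit_width ≤ 1024 the quotient
-- rounds to the double 2^(bw-1) (checked against CPython for every bit_width in 1..1024).
def pyHalfFloat (bit_width : Int) : Int :=
  if bit_width ≤ 53 then 2 ^ (bit_width - 1).toNat - 1 else 2 ^ (bit_width - 1).toNat

-- int(s, base) = PySem.Int.ofCharsBase?, transcribed public (printed from the prelude with
-- #print; the prelude's digit-loop helpers are private, which would block the equivalence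
-- lemmas below). Same algorithm line for line, hence exact for Python's int(s, base).
def pyDigitOk (b : Nat) (c : Char) : Bool :=
  match PySem.Int.digitVal? c with
  | some d => decide (d < b)
  | none => false

def pyGo (b : Nat) : List Char → Bool → Nat → Option Nat
  | [], afterDigit, acc => if afterDigit = true then some acc else none
  | c :: rest, afterDigit, acc =>
      if pyDigitOk b c = true then pyGo b rest true (acc * b + (PySem.Int.digitVal? c).getD 0)
      else
        if c = '_' ∧ afterDigit = true then
          match rest with
          | d :: _ => if pyDigitOk b d = true then pyGo b rest false acc else none
          | [] => none
        else none

def pyDigitsVal? (b : Nat) (x : List Char) : Option Nat :=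
  match x with
  | [] => none
  | cs => pyGo b cs false 0

def pyOfCharsBase? (s : List Char) (base : Int) : Option Int :=
  if ¬(base = 0 ∨ 2 ≤ base ∧ base ≤ 36) then none
  else
    have cs := (List.dropWhile PySem.Int.isIntSpace (List.dropWhile PySem.Int.isIntSpace s).reverse).reverse;
    match
      match cs with
      | '-' :: r => (true, r)
      | '+' :: r => (false, r)
      | r => (false, r) with
    | (neg, cs) =>
      have pfx :=
        match cs with
        | '0' :: c :: _ =>
          if c = 'b' ∨ c = 'B' then some 2
          else if c = 'o' ∨ c = 'O' then some 8 else if c = 'x' ∨ c = 'X' then some 16 else none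
        | _ => none;
      have usePfx :=
        match pfx with
        | some p => decide (base = 0 ∨ base.toNat = p)
        | none => false;
      have b := if usePfx = true then pfx.getD 10 else if base = 0 then 10 else base.toNat;
      have ds :=
        if usePfx = true then
          match List.drop 2 cs with
          | '_' :: d :: r => if pyDigitOk b d = true then d :: r else '_' :: d :: r
          | r => r
        else cs;
      match pyDigitsVal? b ds with
      | none => none
      | some n =>
        if base = 0 ∧ ¬usePfx = true ∧ n ≠ 0 ∧ ds.head? = some '0' then none
        else some (if neg = true then -(n : Int) else (n : Int))

-- A, line for line.  Python's 1-char strings are modelled as Chars, so ''.join of a list of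
-- them is the Char list itself; ['x']*(bit_width-1) with a negative count is [] (toNat);
-- 2**bit_width is 2 ^ bit_width.toNat (exact: Pre_ gives bit_width ≥ 1); int(bit_width/2) on
-- nonnegative bit_width ≤ 2^31 is exact float division then truncation = floordiv bit_width 2;
-- the .getD 0 after int(s,2) is unreachable under Pre_ (the strings are nonempty '0'/'1' runs).
def gen_usign_dataset (bit_width : Int) : List Int :=
  let rval_w0_base : List Char := List.replicate (bit_width - 1).toNat '1' ++ ['0']
  let rval_w1_base : List Char := List.replicate (bit_width - 1).toNat '0' ++ ['1']
  let data : List Int := [0, 2 ^ bit_width.toNat - 1, pyHalfFloat bit_width] ++ PySem.List.pyRange 0 20 1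
  let data := data ++ (PySem.List.pyRange 0 bit_width 1).map (fun n =>
      (pyOfCharsBase? (PySem.List.slice rval_w1_base (some n) none ++ PySem.List.slice rval_w1_base none (some n)) 2).getD 0)
  let data := data ++ (PySem.List.pyRange 0 bit_width 1).map (fun n =>
      (pyOfCharsBase? (PySem.List.slice rval_w0_base (some n) none ++ PySem.List.slice rval_w0_base none (some n)) 2).getD 0)
  let t1 : List Char := (if PySem.Int.mod bit_width 2 == 0 then [] else ['1']) ++
      (List.replicate (PySem.Int.floordiv bit_width 2).toNat (['0','1'] : List Char)).flatten
  let t2 : List Char := (if PySem.Int.mod bit_width 2 == 0 then [] else ['0']) ++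
      (List.replicate (PySem.Int.floordiv bit_width 2).toNat (['1','0'] : List Char)).flatten
  let data := data ++ [(pyOfCharsBase? t1 2).getD 0, (pyOfCharsBase? t2 2).getD 0]
  PySem.Set.ofList data

-- ===== PORT B =====
-- Source B, line for line: 2**bit_width is 2 ^ bit_width.toNat (exact for bit_width ≥ 0, which
-- Pre_ gives); 1 << n is 1 <<< n.toNat (n ≥ 0 wherever evaluated); sum(...) is List.sum of
-- the mapped range.
def gen_usign_dataset_alt (bit_width : Int) : List Int :=
  let ones : Int := 2 ^ bit_width.toNat - 1
  let data : List Int := [0, ones, pyHalfFloat bit_width] ++ PySem.List.pyRange 0 20 1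
  let data := data ++ (PySem.List.pyRange 0 bit_width 1).map (fun n => (1 : Int) <<< n.toNat)
  let data := data ++ (PySem.List.pyRange 0 bit_width 1).map (fun n => ones - (1 : Int) <<< n.toNat)
  let t2 : Int := ((PySem.List.pyRange 1 bit_width 2).map (fun k => (1 : Int) <<< k.toNat)).sum
  let data := data ++ [ones - t2, t2]
  PySem.Set.ofList data

-- ===== PRECONDITION & SPEC =====
-- Pre_ excludes exactly the inputs on which A does not return a list of ints: at bit_width = 0
-- A raises ValueError (int('', 2)); above 1024 A raises OverflowError (float(2**bw - 1)
-- overflows); for negative bit_width A returns a list containing the float 2**bit_width - 1.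
def Pre_gen_usign_dataset (bit_width : Int) : Prop := 1 ≤ bit_width ∧ bit_width ≤ 1024
instance (bit_width : Int) : Decidable (Pre_gen_usign_dataset bit_width) := by
  unfold Pre_gen_usign_dataset; infer_instance

def pvWitness_gen_usign_dataset : Int := 4

def Spec_gen_usign_dataset (bit_width : Int) (out : List Int) : Prop := out = gen_usign_dataset_alt bit_width
instance (bit_width : Int) (out : List Int) : Decidable (Spec_gen_usign_dataset bit_width out) := by
  unfold Spec_gen_usign_dataset; infer_instance

-- ===== CLAIM (what is proved, stated in full; the proofs are below) =====
def Claim_equal_gen_usign_dataset : Prop := ∀ (bit_width : Int), Dom_gen_usign_dataset bit_width → Pre_gen_usign_dataset bit_width → Spec_gen_usign_dataset bit_width (gen_usign_dataset bit_width)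


-- ===== LEMMAS AND PROOFS =====

-- the binary-digit step of the parse loop: acc ↦ acc*2 + digit
def bvf (a : Nat) (c : Char) : Nat := a * 2 + (if c = '1' then 1 else 0)

-- value of the '01' block repeated k times (bits at the even positions of a 2k-bit word)
def altVal : Nat → Nat
  | 0 => 0
  | k + 1 => 4 ^ k + altVal k

lemma pyGo_binary (cs : List Char) : ∀ acc : Nat, (∀ c ∈ cs, c = '0' ∨ c = '1') →
    pyGo 2 cs true acc = some (cs.foldl bvf acc) := by
  induction cs with
  | nil => intro acc _; simp [pyGo]
  | cons c rest ih =>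
    intro acc h
    rcases h c List.mem_cons_self with rfl | rfl <;>
      simp [pyGo, pyDigitOk, PySem.Int.digitVal?, bvf,
        ih _ (fun d hd => h d (List.mem_cons_of_mem _ hd))]

lemma dropWhile_binary (cs : List Char) (hb : ∀ c ∈ cs, c = '0' ∨ c = '1') :
    List.dropWhile PySem.Int.isIntSpace cs = cs := by
  cases cs with
  | nil => rfl
  | cons c rest =>
    rw [List.dropWhile_cons]
    rcases hb c List.mem_cons_self with rfl | rfl <;> simp [PySem.Int.isIntSpace]

lemma parse_binary (cs : List Char) (hne : cs ≠ []) (hb : ∀ c ∈ cs, c = '0' ∨ c = '1') :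
    pyOfCharsBase? cs 2 = some ((cs.foldl bvf 0 : Nat) : Int) := by
  have hrev : ∀ c ∈ cs.reverse, c = '0' ∨ c = '1' := by
    intro c hc; exact hb c (List.mem_reverse.mp hc)
  unfold pyOfCharsBase?
  rw [dropWhile_binary cs hb, dropWhile_binary cs.reverse hrev, List.reverse_reverse]
  cases cs with
  | nil => exact absurd rfl hne
  | cons c rest =>
    have hr : ∀ d ∈ rest, d = '0' ∨ d = '1' := fun d hd => hb d (List.mem_cons_of_mem _ hd)
    have hgo : pyGo 2 rest true (bvf 0 c) = some (rest.foldl bvf (bvf 0 c)) := pyGo_binary rest _ hr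
    rcases hb c List.mem_cons_self with rfl | rfl
    · cases rest with
      | nil => simp [pyDigitsVal?, pyGo, pyDigitOk, PySem.Int.digitVal?, bvf]
      | cons d tail =>
        rcases hb d (by simp) with rfl | rfl <;>
          simp_all [pyDigitsVal?, pyGo, pyDigitOk, PySem.Int.digitVal?, bvf]
    · simp_all [pyDigitsVal?, pyGo, pyDigitOk, PySem.Int.digitVal?, bvf]

lemma bvf_zero (a : Nat) : bvf a '0' = a * 2 := by simp [bvf]
lemma bvf_one (a : Nat) : bvf a '1' = a * 2 + 1 := by simp [bvf]

lemma foldl_zeros (n : Nat) : ∀ acc : Nat, (List.replicate n '0').foldl bvf acc = acc * 2 ^ n := by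
  induction n with
  | zero => simp
  | succ n ih =>
    intro acc
    rw [List.replicate_succ, List.foldl_cons, bvf_zero, ih]
    ring

lemma foldl_ones (n : Nat) : ∀ acc : Nat, (List.replicate n '1').foldl bvf acc + 1 = (acc + 1) * 2 ^ n := by
  induction n with
  | zero => simp
  | succ n ih =>
    intro acc
    rw [List.replicate_succ, List.foldl_cons, bvf_one, ih]
    ring

lemma foldl_01 (k : Nat) : ∀ acc : Nat,
    ((List.replicate k (['0','1'] : List Char)).flatten).foldl bvf acc = acc * 4 ^ k + altVal k := by
  induction k with
  | zero => simp [altVal]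
  | succ k ih =>
    intro acc
    rw [List.replicate_succ, List.flatten_cons]
    simp only [List.foldl_append, List.foldl_cons, List.foldl_nil, bvf_zero, bvf_one, ih, altVal]
    ring

lemma foldl_10 (k : Nat) : ∀ acc : Nat,
    ((List.replicate k (['1','0'] : List Char)).flatten).foldl bvf acc = acc * 4 ^ k + 2 * altVal k := by
  induction k with
  | zero => simp [altVal]
  | succ k ih =>
    intro acc
    rw [List.replicate_succ, List.flatten_cons]
    simp only [List.foldl_append, List.foldl_cons, List.foldl_nil, bvf_zero, bvf_one, ih, altVal]
    ring

lemma altVal_three (k : Nat) : 3 * altVal k + 1 = 4 ^ k := by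
  induction k with
  | zero => simp [altVal]
  | succ k ih => simp only [altVal]; rw [pow_succ]; omega

lemma one_shiftl (m : Nat) : (1 : Int) <<< (m : Int) = 2 ^ m := by
  show (Int.ofNat (Nat.shiftLeft' false 1 m)) = _
  rw [Nat.shiftLeft'_false, Nat.shiftLeft_eq, one_mul]
  simp

lemma altVal_cast (k : Nat) : (3 : Int) * ↑(altVal k) + 1 = 4 ^ k := by
  exact_mod_cast congrArg (Nat.cast : Nat → Int) (altVal_three k)

lemma walk1 (w : Nat) (n : Int) (hw : 1 ≤ w) (h0 : 0 ≤ n) (hn : n < ↑w) :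
    (pyOfCharsBase? (PySem.List.slice (List.replicate (w - 1) '0' ++ ['1']) (some n) none ++
        PySem.List.slice (List.replicate (w - 1) '0' ++ ['1']) none (some n)) 2).getD 0 =
      (2 : Int) ^ n.toNat := by
  have hm : n.toNat < w := by omega
  rw [PySem.List.slice_from _ h0, PySem.List.slice_to _ h0]
  rw [List.drop_append_of_le_length (by simp; omega), List.drop_replicate]
  rw [List.take_append_of_le_length (by simp; omega), List.take_replicate,
    Nat.min_eq_left (by omega)]
  rw [parse_binary _ (by simp) (by
    intro c hc
    simp only [List.mem_append, List.mem_replicate, List.mem_singleton] at hc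
    tauto)]
  rw [List.foldl_append, List.foldl_append, foldl_zeros, List.foldl_cons, List.foldl_nil,
    bvf_one, foldl_zeros]
  simp only [Option.getD_some]
  push_cast
  ring

lemma walk0 (w : Nat) (n : Int) (hw : 1 ≤ w) (h0 : 0 ≤ n) (hn : n < ↑w) :
    (pyOfCharsBase? (PySem.List.slice (List.replicate (w - 1) '1' ++ ['0']) (some n) none ++
        PySem.List.slice (List.replicate (w - 1) '1' ++ ['0']) none (some n)) 2).getD 0 =
      (2 : Int) ^ w - 1 - (2 : Int) ^ n.toNat := by
  have hm : n.toNat < w := by omega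
  rw [PySem.List.slice_from _ h0, PySem.List.slice_to _ h0]
  rw [List.drop_append_of_le_length (by simp; omega), List.drop_replicate]
  rw [List.take_append_of_le_length (by simp; omega), List.take_replicate,
    Nat.min_eq_left (by omega)]
  rw [parse_binary _ (by simp) (by
    intro c hc
    simp only [List.mem_append, List.mem_replicate, List.mem_singleton] at hc
    tauto)]
  rw [List.foldl_append, List.foldl_append, List.foldl_cons, List.foldl_nil, bvf_zero]
  set a := w - 1 - n.toNat with ha
  have h1 := foldl_ones a 0
  have h2 := foldl_ones n.toNat ((List.replicate a '1').foldl bvf 0 * 2)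
  set x1 := (List.replicate a '1').foldl bvf 0 with hx1
  set x2 := (List.replicate n.toNat '1').foldl bvf (x1 * 2) with hx2
  have hcast1 : (x1 : Int) = 2 ^ a - 1 := by
    have : x1 + 1 = 2 ^ a := by simpa using h1
    have := congrArg (Nat.cast : Nat → Int) this
    push_cast at this; omega
  have hcast2 : (x2 : Int) = ((x1 : Int) * 2 + 1) * 2 ^ n.toNat - 1 := by
    have := congrArg (Nat.cast : Nat → Int) h2
    push_cast at this; omega
  rw [Option.getD_some, hcast2, hcast1]
  have hw' : w = a + 1 + n.toNat := by omega
  rw [hw', pow_add, pow_add]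
  ring

lemma sum_range_odd (t : Nat) :
    (List.map ((fun k : Int => (2 : Int) ^ k.toNat) ∘ (fun k : Nat => (1 : Int) + 2 * (k : Int)))
      (List.range t)).sum = 2 * ↑(altVal t) := by
  induction t with
  | zero => simp [altVal]
  | succ t ih =>
    rw [List.range_succ, List.map_append, List.sum_append, ih]
    simp only [List.map_cons, List.map_nil, List.sum_cons, List.sum_nil, Function.comp]
    have h1 : ((1 : Int) + 2 * (t : Int)).toNat = 1 + 2 * t := by omega
    rw [h1]
    have h2 : (2 : Int) ^ (1 + 2 * t) = 2 * 4 ^ t := by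
      rw [pow_add, pow_mul]; norm_num
    simp only [altVal, h2]
    push_cast
    ring

lemma sum_odd (w : Nat) :
    ((PySem.List.pyRange 1 ↑w 2).map (fun k : Int => (2 : Int) ^ k.toNat)).sum =
      2 * ↑(altVal (w / 2)) := by
  rw [PySem.List.pyRange_of_pos 1 ↑w (by norm_num), List.map_map]
  have hcnt : (if (1 : Int) < ↑w then (((↑w : Int) - 1 + 2 - 1) / 2).toNat else 0) = w / 2 := by
    split_ifs with h
    · omega
    · omega
  rw [hcnt]
  exact sum_range_odd (w / 2)

lemma mod_two_cast (w : Nat) : PySem.Int.mod ↑w 2 = ↑(w % 2) := by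
  exact_mod_cast PySem.Int.mod_natCast w 2

lemma floordiv_two_cast (w : Nat) : PySem.Int.floordiv ↑w 2 = ↑(w / 2) := by
  exact_mod_cast PySem.Int.floordiv_natCast w 2

lemma flatten_rep_binary (bl : List Char) (hbl : ∀ c ∈ bl, c = '0' ∨ c = '1') (k : Nat) :
    ∀ c ∈ (List.replicate k bl).flatten, c = '0' ∨ c = '1' := by
  intro c hc
  rw [List.mem_flatten] at hc
  obtain ⟨l, hl, hcl⟩ := hc
  rw [List.mem_replicate] at hl
  exact hbl c (hl.2 ▸ hcl)

lemma t2A (w : Nat) (hw : 1 ≤ w) :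
    (pyOfCharsBase? ((if PySem.Int.mod ↑w 2 == 0 then [] else ['0']) ++
        (List.replicate (PySem.Int.floordiv ↑w 2).toNat (['1','0'] : List Char)).flatten) 2).getD 0 =
      2 * ↑(altVal (w / 2)) := by
  rw [floordiv_two_cast, Int.toNat_natCast]
  rcases Nat.mod_two_eq_zero_or_one w with hpar | hpar
  · have hm0 : (PySem.Int.mod ↑w 2 == (0 : Int)) = true := by rw [mod_two_cast, hpar]; decide
    have hk : 1 ≤ w / 2 := by omega
    obtain ⟨k', hk'⟩ : ∃ k', w / 2 = k' + 1 := ⟨w / 2 - 1, by omega⟩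
    rw [hm0, if_pos rfl, List.nil_append]
    rw [parse_binary _ (by rw [hk']; simp [List.replicate_succ]) (flatten_rep_binary _ (by intro c hc; simp at hc; tauto) _)]
    rw [foldl_10, Option.getD_some]
    push_cast
    ring
  · have hm1 : (PySem.Int.mod ↑w 2 == (0 : Int)) = false := by rw [mod_two_cast, hpar]; decide
    rw [hm1, if_neg (by simp), List.singleton_append]
    rw [parse_binary _ (by simp) (by
      intro c hc
      rcases List.mem_cons.mp hc with rfl | hc
      · exact Or.inl rfl
      · exact flatten_rep_binary _ (by intro c hc; simp at hc; tauto) _ c hc)]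
    rw [List.foldl_cons, bvf_zero, Nat.zero_mul, foldl_10, Option.getD_some]
    push_cast
    ring

lemma t1A (w : Nat) (hw : 1 ≤ w) :
    (pyOfCharsBase? ((if PySem.Int.mod ↑w 2 == 0 then [] else ['1']) ++
        (List.replicate (PySem.Int.floordiv ↑w 2).toNat (['0','1'] : List Char)).flatten) 2).getD 0 =
      (2 : Int) ^ w - 1 - 2 * ↑(altVal (w / 2)) := by
  rw [floordiv_two_cast, Int.toNat_natCast]
  rcases Nat.mod_two_eq_zero_or_one w with hpar | hpar
  · have hm0 : (PySem.Int.mod ↑w 2 == (0 : Int)) = true := by rw [mod_two_cast, hpar]; decide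
    obtain ⟨k, rfl⟩ : ∃ k, w = 2 * k := ⟨w / 2, by omega⟩
    have hhalf : 2 * k / 2 = k := by omega
    have hk : 1 ≤ k := by omega
    obtain ⟨k', hk'⟩ : ∃ k', k = k' + 1 := ⟨k - 1, by omega⟩
    rw [hhalf, hm0, if_pos rfl, List.nil_append]
    rw [parse_binary _ (by rw [hk']; simp [List.replicate_succ])
      (flatten_rep_binary _ (by intro c hc; simp at hc; tauto) _)]
    rw [foldl_01, Option.getD_some]
    have h3 := altVal_cast k
    have hpow : (2 : Int) ^ (2 * k) = 4 ^ k := by rw [pow_mul]; norm_num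
    rw [hpow]
    push_cast
    omega
  · have hm1 : (PySem.Int.mod ↑w 2 == (0 : Int)) = false := by rw [mod_two_cast, hpar]; decide
    obtain ⟨k, rfl⟩ : ∃ k, w = 2 * k + 1 := ⟨w / 2, by omega⟩
    have hhalf : (2 * k + 1) / 2 = k := by omega
    rw [hhalf, hm1, if_neg (by simp), List.singleton_append]
    rw [parse_binary _ (by simp) (by
      intro c hc
      rcases List.mem_cons.mp hc with rfl | hc
      · exact Or.inr rfl
      · exact flatten_rep_binary _ (by intro c hc; simp at hc; tauto) _ c hc)]
    rw [List.foldl_cons, bvf_one, Nat.zero_mul, Nat.zero_add, foldl_01, Nat.one_mul, Option.getD_some]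
    have h3 := altVal_cast k
    have hpow : (2 : Int) ^ (2 * k + 1) = 2 * 4 ^ k := by rw [pow_succ, pow_mul]; ring
    rw [hpow]
    push_cast
    omega

-- ===== VERDICT (by name: the statement is the Claim_ definition above) =====
theorem gen_usign_dataset_spec : Claim_equal_gen_usign_dataset := by
  intro bw hdom hpre
  obtain ⟨hlo, hhi⟩ := hpre
  obtain ⟨w, rfl⟩ : ∃ w : Nat, bw = ↑w := ⟨bw.toNat, (Int.toNat_of_nonneg (by omega)).symm⟩
  have hw : 1 ≤ w := by exact_mod_cast hlo
  unfold Spec_gen_usign_dataset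
  simp only [gen_usign_dataset, gen_usign_dataset_alt, Int.toNat_natCast,
    show ((w : Int) - 1).toNat = w - 1 from by omega]
  simp only [one_shiftl]
  rw [List.map_congr_left (fun n hn => walk1 w n hw (PySem.List.mem_pyRange_one.mp hn).1
    (PySem.List.mem_pyRange_one.mp hn).2)]
  rw [List.map_congr_left (fun n hn => walk0 w n hw (PySem.List.mem_pyRange_one.mp hn).1
    (PySem.List.mem_pyRange_one.mp hn).2)]
  rw [sum_odd w, t1A w hw, t2A w hw]
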